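-- pv_equiv track=rewrite | github.com/hxingjie/Learning_DL_Projects | Fudan_NLP/TASK_2/cap_2.py | text_preprocess
-- ===== SOURCE A (Python) =====
-- def text_preprocess(sentences):
--     word2id = {'_':0}
--     id2word = {0:'_'}
--     corpus = []
--     for sentence in sentences:
--         sentence = sentence.lower()
--         words = sentence.split(' ')
--         cs = []
--         for word in words:
--             if word not in word2id:
--                 idx = len(word2id)
--                 word2id[word] = idx
--                 id2word[idx] = word
--             cs.append(word2id[word])
--         corpus.append(cs)
--
--     return word2id, id2word, corpus
-- ===== SOURCE B (Python) =====
-- def text_preprocess(sentences):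
--     # pass 1: build the vocabulary in first-appearance order (seeded with '_':0)
--     word2id = {'_': 0}
--     id2word = {0: '_'}
--     for sentence in sentences:
--         for word in sentence.lower().split(' '):
--             if word not in word2id:
--                 idx = len(word2id)
--                 word2id[word] = idx
--                 id2word[idx] = word
--     # pass 2: encode every sentence by pure lookup in the finished vocabulary
--     corpus = [[word2id[word] for word in sentence.lower().split(' ')]
--               for sentence in sentences]
--     return word2id, id2word, corpus
-- ===== Notes on version B (the rewrite author's own statement) =====
-- stated objective: simpler
-- what changed: Replaces A's single loop that interleaves vocabulary building with encoding (threading dicts and a per-sentence accumulator) by two independent passes: one that only builds word2id/id2word, then a pure comprehension that encodes each sentence by lookup in the finished vocabulary.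
import Mathlib
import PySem

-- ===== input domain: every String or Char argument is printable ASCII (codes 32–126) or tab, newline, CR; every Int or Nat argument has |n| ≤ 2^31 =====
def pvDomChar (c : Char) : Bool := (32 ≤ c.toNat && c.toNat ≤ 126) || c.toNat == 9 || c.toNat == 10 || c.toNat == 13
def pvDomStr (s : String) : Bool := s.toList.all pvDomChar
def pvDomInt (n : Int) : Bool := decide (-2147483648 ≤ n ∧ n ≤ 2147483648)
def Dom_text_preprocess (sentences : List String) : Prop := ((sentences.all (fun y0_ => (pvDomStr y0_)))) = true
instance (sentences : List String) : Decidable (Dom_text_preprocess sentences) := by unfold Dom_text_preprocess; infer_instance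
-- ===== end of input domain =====

-- B does the same job in two independent passes (build vocabulary, then encode by lookup)
-- instead of A's single loop interleaving both; same cost, simpler decomposition.

-- ===== PORT A =====
-- sentence.lower().split(' ')  (identical line in both Pythons)
def pvToks (s : String) : List String := (PySem.Str.split? (PySem.Str.lower s) " ").getD []
-- split? is exact for s.split(' '); the separator " " is nonempty so it is never none and getD [] is unreachable

-- the vocabulary-registration lines "if word not in word2id: idx = len(word2id); word2id[word] = idx; id2word[idx] = word"
-- (identical in both Pythons; A runs it inside its combined loop, B in its first pass)
def pvAddW (d : PySem.Dict String Int × PySem.Dict Int String) (word : String) :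
    PySem.Dict String Int × PySem.Dict Int String :=
  if d.1.contains word then d
  else (d.1.insert word (d.1.size : Int), d.2.insert (d.1.size : Int) word)

def text_preprocess (sentences : List String) : (List (String × Int)) × (List (Int × String)) × List (List Int) :=
  let res := sentences.foldl
    (fun st sentence =>
      let words := pvToks sentence
      let inner := words.foldl
        (fun st2 word =>
          let d' := pvAddW (st2.1, st2.2.1) word
          (d'.1, d'.2, st2.2.2 ++ [d'.1.getD word 0]))
        (st.1, st.2.1, ([] : List Int))
      (inner.1, inner.2.1, st.2.2 ++ [inner.2.2]))
    ((PySem.Dict.ofList [("_", (0:Int))], PySem.Dict.ofList [((0:Int), "_")], ([] : List (List Int))))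
  (res.1.items, res.2.1.items, res.2.2)

-- ===== PORT B =====
def text_preprocess_alt (sentences : List String) : (List (String × Int)) × (List (Int × String)) × List (List Int) :=
  let d := sentences.foldl (fun d sentence => (pvToks sentence).foldl pvAddW d)
    ((PySem.Dict.ofList [("_", (0:Int))], PySem.Dict.ofList [((0:Int), "_")]))
  (d.1.items, d.2.items,
    sentences.map (fun sentence => (pvToks sentence).map (fun word => d.1.getD word 0)))

-- ===== PRECONDITION & SPEC =====
def Spec_text_preprocess (sentences : List String) (out : (List (String × Int)) × (List (Int × String)) × List (List Int)) : Prop := out = text_preprocess_alt sentences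
instance (sentences : List String) (out : (List (String × Int)) × (List (Int × String)) × List (List Int)) : Decidable (Spec_text_preprocess sentences out) := by unfold Spec_text_preprocess; infer_instance

-- ===== CLAIM (what is proved, stated in full; the proofs are below) =====
def Claim_equal_text_preprocess : Prop := ∀ (sentences : List String), Dom_text_preprocess sentences → Spec_text_preprocess sentences (text_preprocess sentences)

-- ===== LEMMAS AND PROOFS =====

theorem pvAddW_contains_self (d : PySem.Dict String Int × PySem.Dict Int String) (w : String) :
    (pvAddW d w).1.contains w = true := by
  unfold pvAddW
  split_ifs with h
  · exact h
  · exact PySem.Dict.contains_insert_self _ _ _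

theorem pvAddW_contains_mono (d : PySem.Dict String Int × PySem.Dict Int String) (w w' : String)
    (h : d.1.contains w = true) : (pvAddW d w').1.contains w = true := by
  unfold pvAddW
  split_ifs with h'
  · exact h
  · simp [PySem.Dict.contains_insert, h]

theorem pvAddW_getD_mono (d : PySem.Dict String Int × PySem.Dict Int String) (w w' : String)
    (h : d.1.contains w = true) : (pvAddW d w').1.getD w 0 = d.1.getD w 0 := by
  unfold pvAddW
  split_ifs with h'
  · rfl
  · have hne : w ≠ w' := by rintro rfl; exact h' h
    exact PySem.Dict.getD_insert_of_ne _ _ _ hne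

theorem foldW_contains_mono (ws : List String) (d : PySem.Dict String Int × PySem.Dict Int String)
    (w : String) (h : d.1.contains w = true) : (ws.foldl pvAddW d).1.contains w = true := by
  induction ws generalizing d with
  | nil => exact h
  | cons x xs ih => exact ih _ (pvAddW_contains_mono d w x h)

theorem foldW_getD_mono (ws : List String) (d : PySem.Dict String Int × PySem.Dict Int String)
    (w : String) (h : d.1.contains w = true) : (ws.foldl pvAddW d).1.getD w 0 = d.1.getD w 0 := by
  induction ws generalizing d with
  | nil => rfl
  | cons x xs ih =>
    rw [List.foldl_cons, ih _ (pvAddW_contains_mono d w x h), pvAddW_getD_mono d w x h]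

theorem foldW_contains_of_mem (ws : List String) (d : PySem.Dict String Int × PySem.Dict Int String)
    (w : String) (h : w ∈ ws) : (ws.foldl pvAddW d).1.contains w = true := by
  induction ws generalizing d with
  | nil => cases h
  | cons x xs ih =>
    rcases List.mem_cons.mp h with rfl | hx
    · exact foldW_contains_mono xs _ w (pvAddW_contains_self d w)
    · exact ih _ hx

theorem foldS_getD_mono (ss : List String) (d : PySem.Dict String Int × PySem.Dict Int String)
    (w : String) (h : d.1.contains w = true) :
    (ss.foldl (fun d s => (pvToks s).foldl pvAddW d) d).1.getD w 0 = d.1.getD w 0 := by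
  induction ss generalizing d with
  | nil => rfl
  | cons s ss ih =>
    rw [List.foldl_cons, ih _ (foldW_contains_mono _ d w h), foldW_getD_mono _ d w h]

-- A's inner (per-sentence) loop equals B's dict-building fold plus a lookup map in the resulting dict
theorem innerA_eq (ws : List String) (d : PySem.Dict String Int × PySem.Dict Int String)
    (cs : List Int) :
    ws.foldl (fun st2 word =>
        let d' := pvAddW (st2.1, st2.2.1) word
        (d'.1, d'.2, st2.2.2 ++ [d'.1.getD word 0])) (d.1, d.2, cs)
      = ((ws.foldl pvAddW d).1, (ws.foldl pvAddW d).2,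
         cs ++ ws.map (fun w => (ws.foldl pvAddW d).1.getD w 0)) := by
  induction ws generalizing d cs with
  | nil => simp
  | cons x xs ih =>
    simp only [List.foldl_cons, List.map_cons]
    rw [ih (pvAddW d x) (cs ++ [(pvAddW d x).1.getD x 0])]
    rw [foldW_getD_mono xs (pvAddW d x) x (pvAddW_contains_self d x)]
    simp

-- A's outer loop equals B's two passes, for any start state
theorem outerA_eq (ss : List String) (d : PySem.Dict String Int × PySem.Dict Int String)
    (acc : List (List Int)) :
    ss.foldl (fun st sentence =>
        let words := pvToks sentence
        let inner := words.foldl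
          (fun st2 word =>
            let d' := pvAddW (st2.1, st2.2.1) word
            (d'.1, d'.2, st2.2.2 ++ [d'.1.getD word 0]))
          (st.1, st.2.1, ([] : List Int))
        (inner.1, inner.2.1, st.2.2 ++ [inner.2.2])) (d.1, d.2, acc)
      = (let df := ss.foldl (fun d s => (pvToks s).foldl pvAddW d) d
         (df.1, df.2, acc ++ ss.map (fun s => (pvToks s).map (fun w => df.1.getD w 0)))) := by
  induction ss generalizing d acc with
  | nil => simp
  | cons s ss ih =>
    simp only [List.foldl_cons, List.map_cons]
    rw [innerA_eq (pvToks s) d []]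
    rw [ih ((pvToks s).foldl pvAddW d) (acc ++ [List.nil ++ (pvToks s).map
      (fun w => ((pvToks s).foldl pvAddW d).1.getD w 0)])]
    simp only [List.nil_append, List.append_assoc, List.singleton_append]
    have hmap : (pvToks s).map (fun w => ((pvToks s).foldl pvAddW d).1.getD w 0)
        = (pvToks s).map (fun w =>
            (ss.foldl (fun d s => (pvToks s).foldl pvAddW d) ((pvToks s).foldl pvAddW d)).1.getD w 0) := by
      refine List.map_congr_left (fun w hw => ?_)
      rw [foldS_getD_mono ss _ w (foldW_contains_of_mem _ d w hw)]
    rw [hmap]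

-- ===== VERDICT (by name: the statement is the Claim_ definition above) =====
theorem text_preprocess_spec : Claim_equal_text_preprocess := by
  intro sentences _
  unfold Spec_text_preprocess text_preprocess text_preprocess_alt
  rw [show ((PySem.Dict.ofList [("_", (0:Int))], PySem.Dict.ofList [((0:Int), "_")],
        ([] : List (List Int)))
      : PySem.Dict String Int × PySem.Dict Int String × List (List Int))
      = ((PySem.Dict.ofList [("_", (0:Int))], PySem.Dict.ofList [((0:Int), "_")]).1,
         (PySem.Dict.ofList [("_", (0:Int))], PySem.Dict.ofList [((0:Int), "_")]).2,
         ([] : List (List Int))) from rfl]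
  rw [outerA_eq]
  rfl
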